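-- pv_equiv track=rewrite | github.com/srsummerson/analysis | DMS_functions/parse_trials.py | get_first_idx
-- ===== SOURCE A (Python) =====
-- def get_first_idx(trial_events):
-- 	actions = ['top_lever','bottom_lever']
-- 	outcomes = ['rewarded_poke','unrewarded_poke']
-- 	action_idx = None
-- 	outcome_idx = None
-- 	for i,event in enumerate(trial_events):
-- 		if event in actions:
-- 			action_idx = i
-- 			break
-- 	for j,event in enumerate(trial_events):
-- 		if event in outcomes:
-- 			outcome_idx = j
-- 			break
-- 	if action_idx == None or outcome_idx == None:
-- 		raise TypeError("This trial is incomplete (no action or outcome)")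
-- 	return action_idx, outcome_idx
-- ===== SOURCE B (Python) =====
-- def get_first_idx(trial_events):
--     actions = ('top_lever', 'bottom_lever')
--     outcomes = ('rewarded_poke', 'unrewarded_poke')
--     action_idx = None
--     outcome_idx = None
--     for i, event in enumerate(trial_events):
--         if action_idx is None and event in actions:
--             action_idx = i
--         if outcome_idx is None and event in outcomes:
--             outcome_idx = i
--         if action_idx is not None and outcome_idx is not None:
--             break
--     if action_idx is None or outcome_idx is None:
--         raise TypeError("This trial is incomplete (no action or outcome)")
--     return action_idx, outcome_idx
-- ===== Notes on version B (the rewrite author's own statement) =====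
-- stated objective: alternative
-- what changed: A makes two separate full scans (one for the first action, one for the first outcome); B makes a single pass maintaining both indices and stops as soon as both are found.
import Mathlib
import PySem

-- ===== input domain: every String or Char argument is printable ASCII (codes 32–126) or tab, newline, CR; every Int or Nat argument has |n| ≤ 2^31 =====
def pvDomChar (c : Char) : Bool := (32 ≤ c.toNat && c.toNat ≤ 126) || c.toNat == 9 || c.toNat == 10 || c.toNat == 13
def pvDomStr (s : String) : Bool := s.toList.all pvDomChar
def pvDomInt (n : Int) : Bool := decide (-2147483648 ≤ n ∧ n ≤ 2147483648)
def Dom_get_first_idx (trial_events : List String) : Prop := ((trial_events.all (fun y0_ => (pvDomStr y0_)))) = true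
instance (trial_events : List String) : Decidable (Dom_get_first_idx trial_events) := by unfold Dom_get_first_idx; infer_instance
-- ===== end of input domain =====

-- ===== PORT A =====
-- B fuses A's two scans into one pass with an early joint stop (objective: alternative; same O(n) cost).
-- first i ≥ start index (as Int) of an event in ['top_lever','bottom_lever'] (A's first loop)
def pvFindAction : List String → Int → Option Int
  | [], _ => none
  | e :: rest, i =>
      if ["top_lever", "bottom_lever"].contains e then some i else pvFindAction rest (i + 1)

-- first j of an event in ['rewarded_poke','unrewarded_poke'] (A's second loop)
def pvFindOutcome : List String → Int → Option Int
  | [], _ => none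
  | e :: rest, j =>
      if ["rewarded_poke", "unrewarded_poke"].contains e then some j else pvFindOutcome rest (j + 1)

def get_first_idx (trial_events : List String) : Int × Int :=
  match pvFindAction trial_events 0, pvFindOutcome trial_events 0 with
  | some a, some o => (a, o)
  | _, _ => (0, 0)  -- Python raises TypeError here; excluded by Pre_get_first_idx

-- ===== PORT B =====
-- single pass: carries the index and both (still-None?) indices, breaking once both are set
def pvLoopB : List String → Int → Option Int → Option Int → Option Int × Option Int
  | [], _, a, o => (a, o)
  | e :: rest, i, a, o =>
      let a' := if a.isNone && (e == "top_lever" || e == "bottom_lever") then some i else a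
      let o' := if o.isNone && (e == "rewarded_poke" || e == "unrewarded_poke") then some i else o
      if a'.isSome && o'.isSome then (a', o') else pvLoopB rest (i + 1) a' o'

def get_first_idx_alt (trial_events : List String) : Int × Int :=
  let r := pvLoopB trial_events 0 none none
  match r.1 with
  | none => (0, 0)  -- Python raises TypeError here; excluded by Pre_get_first_idx
  | some a =>
    match r.2 with
    | none => (0, 0)  -- Python raises TypeError here; excluded by Pre_get_first_idx
    | some o => (a, o)

-- ===== PRECONDITION & SPEC =====
-- Pre_ excludes exactly the inputs on which A (and B) raise TypeError: trials with no action or no outcome event.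
def Pre_get_first_idx (trial_events : List String) : Prop :=
  (trial_events.any (fun e => e == "top_lever" || e == "bottom_lever")) = true ∧
  (trial_events.any (fun e => e == "rewarded_poke" || e == "unrewarded_poke")) = true
instance (trial_events : List String) : Decidable (Pre_get_first_idx trial_events) := by unfold Pre_get_first_idx; infer_instance

def pvWitness_get_first_idx : List String := ["center_poke", "top_lever", "rewarded_poke"]

def Spec_get_first_idx (trial_events : List String) (out : Int × Int) : Prop := out = get_first_idx_alt trial_events
instance (trial_events : List String) (out : Int × Int) : Decidable (Spec_get_first_idx trial_events out) := by unfold Spec_get_first_idx; infer_instance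

-- ===== CLAIM (what is proved, stated in full; the proofs are below) =====
def Claim_equal_get_first_idx : Prop := ∀ (trial_events : List String), Dom_get_first_idx trial_events → Pre_get_first_idx trial_events → Spec_get_first_idx trial_events (get_first_idx trial_events)

-- ===== LEMMAS AND PROOFS =====
theorem pvLoopB_some_none (l : List String) : ∀ (i a : Int),
    pvLoopB l i (some a) none = (some a, pvFindOutcome l i) := by
  induction l with
  | nil => intro i a; simp [pvLoopB, pvFindOutcome]
  | cons e rest ih =>
      intro i a
      by_cases h : e = "rewarded_poke" ∨ e = "unrewarded_poke" <;>
        simp [pvLoopB, pvFindOutcome, h, ih]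

theorem pvLoopB_none_some (l : List String) : ∀ (i o : Int),
    pvLoopB l i none (some o) = (pvFindAction l i, some o) := by
  induction l with
  | nil => intro i o; simp [pvLoopB, pvFindAction]
  | cons e rest ih =>
      intro i o
      by_cases h : e = "top_lever" ∨ e = "bottom_lever" <;>
        simp [pvLoopB, pvFindAction, h, ih]

theorem pvLoopB_none_none (l : List String) : ∀ (i : Int),
    pvLoopB l i none none = (pvFindAction l i, pvFindOutcome l i) := by
  induction l with
  | nil => intro i; simp [pvLoopB, pvFindAction, pvFindOutcome]
  | cons e rest ih =>
      intro i
      by_cases ha : e = "top_lever" ∨ e = "bottom_lever" <;>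
      by_cases ho : e = "rewarded_poke" ∨ e = "unrewarded_poke" <;>
        simp [pvLoopB, pvFindAction, pvFindOutcome, ha, ho, ih,
          pvLoopB_some_none, pvLoopB_none_some]

-- ===== VERDICT (by name: the statement is the Claim_ definition above) =====
theorem get_first_idx_spec : Claim_equal_get_first_idx := by
  intro trial_events _ _
  unfold Spec_get_first_idx get_first_idx get_first_idx_alt
  rw [pvLoopB_none_none]
  cases pvFindAction trial_events 0 <;> cases pvFindOutcome trial_events 0 <;> rfl
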